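-- pv_equiv track=rewrite | github.com/VictoriaTGu/codepractice | gene_splicing/gene.py | find_index_of_overlap
-- ===== SOURCE A (Python) =====
-- def find_index_of_overlap(fst_string, snd_string):
--     fst_index = len(fst_string) - 1
--     snd_index = len(snd_string) - 1
--     if snd_index < 0:
--         return None
--     while snd_index >= 0:
--         if fst_index < 0 or fst_string[fst_index] != snd_string[snd_index]:
--             return None
--         else:
--             fst_index -= 1
--             snd_index -= 1
--     return fst_index + 1
-- ===== SOURCE B (Python) =====
-- def find_index_of_overlap(fst_string, snd_string):
--     if snd_string == '':
--         return None
--     if fst_string.endswith(snd_string):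
--         return len(fst_string) - len(snd_string)
--     return None
-- ===== Notes on version B (the rewrite author's own statement) =====
-- stated objective: simpler
-- what changed: Replaces A's backward two-pointer character-by-character scan with one endswith suffix test plus a closed-form offset len(fst)-len(snd).
import Mathlib
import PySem

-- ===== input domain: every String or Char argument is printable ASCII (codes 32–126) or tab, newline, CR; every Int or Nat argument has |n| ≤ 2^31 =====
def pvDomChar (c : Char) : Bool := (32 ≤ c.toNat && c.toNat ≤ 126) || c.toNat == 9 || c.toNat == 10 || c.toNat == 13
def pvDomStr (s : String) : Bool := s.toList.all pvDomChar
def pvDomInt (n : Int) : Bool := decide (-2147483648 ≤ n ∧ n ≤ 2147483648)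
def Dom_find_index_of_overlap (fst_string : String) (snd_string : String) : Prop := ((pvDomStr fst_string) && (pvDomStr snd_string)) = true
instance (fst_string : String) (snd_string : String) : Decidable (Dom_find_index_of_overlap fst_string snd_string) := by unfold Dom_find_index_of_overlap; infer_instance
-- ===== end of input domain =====

-- B replaces A's backward two-pointer character scan with an endswith suffix test plus the closed-form offset len(fst)-len(snd); objective: simpler.


-- ===== PORT A =====
-- A's while loop: counter n = snd_index + 1; fst_index carried as an Int exactly as in A.
def findLoopA (fs ss : List Char) : Int → Nat → Option Int
  | fst_index, 0 => some (fst_index + 1)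
  | fst_index, n + 1 =>
    if fst_index < 0 ∨ PySem.List.pyGet? fs fst_index ≠ PySem.List.pyGet? ss (n : Int) then
      none
    else
      findLoopA fs ss (fst_index - 1) n

def find_index_of_overlap (fst_string : String) (snd_string : String) : Option Int :=
  let fs := fst_string.toList
  let ss := snd_string.toList
  let fst_index : Int := (fs.length : Int) - 1
  let snd_index : Int := (ss.length : Int) - 1
  if snd_index < 0 then none
  else findLoopA fs ss fst_index ss.length

-- ===== PORT B =====
def find_index_of_overlap_alt (fst_string : String) (snd_string : String) : Option Int :=
  if snd_string = "" then none
  else if PySem.Str.endswith fst_string snd_string then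
    some ((fst_string.toList.length : Int) - snd_string.toList.length)
  else none

-- ===== PRECONDITION & SPEC =====
def Spec_find_index_of_overlap (fst_string : String) (snd_string : String) (out : Option Int) : Prop := out = find_index_of_overlap_alt fst_string snd_string
instance (fst_string : String) (snd_string : String) (out : Option Int) : Decidable (Spec_find_index_of_overlap fst_string snd_string out) := by unfold Spec_find_index_of_overlap; infer_instance

-- ===== CLAIM (what is proved, stated in full; the proofs are below) =====
def Claim_equal_find_index_of_overlap : Prop := ∀ (fst_string : String) (snd_string : String), Dom_find_index_of_overlap fst_string snd_string → Spec_find_index_of_overlap fst_string snd_string (find_index_of_overlap fst_string snd_string)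

-- ===== LEMMAS AND PROOFS =====

-- The loop read backwards: over reversed fragments it decides prefix-hood.
theorem findLoopA_reverse (rss : List Char) :
    ∀ (rfs fs2 ss2 : List Char),
      findLoopA (rfs.reverse ++ fs2) (rss.reverse ++ ss2) ((rfs.length : Int) - 1) rss.length
        = if rss <+: rfs then some ((rfs.length : Int) - rss.length) else none := by
  induction rss with
  | nil => intro rfs fs2 ss2; simp [findLoopA]
  | cons c rss' ih =>
    intro rfs fs2 ss2
    cases rfs with
    | nil =>
      simp only [findLoopA, List.length_cons, List.length_nil]
      rw [if_pos (by left; omega)]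
      simp
    | cons d rfs' =>
      have hfs : (d :: rfs').reverse ++ fs2 = rfs'.reverse ++ (d :: fs2) := by simp
      have hss : (c :: rss').reverse ++ ss2 = rss'.reverse ++ (c :: ss2) := by simp
      have hget1 : PySem.List.pyGet? ((d :: rfs').reverse ++ fs2) ((rfs'.length : Int) + 1 - 1)
          = some d := by
        rw [hfs]
        have := PySem.List.pyGet?_append_length (pre := rfs'.reverse) (y := d) (ys := fs2)
        simpa using this
      have hget2 : PySem.List.pyGet? ((c :: rss').reverse ++ ss2) ((rss'.length : Int))
          = some c := by
        rw [hss]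
        have := PySem.List.pyGet?_append_length (pre := rss'.reverse) (y := c) (ys := ss2)
        simpa using this
      simp only [findLoopA, List.length_cons]
      push_cast
      rw [hget1, hget2]
      by_cases hcd : c = d
      · subst hcd
        rw [if_neg (by simp)]
        have : (rfs'.length : Int) + 1 - 1 - 1 = (rfs'.length : Int) - 1 := by omega
        rw [this, hfs, hss, ih rfs' (c :: fs2) (c :: ss2)]
        by_cases hp : rss' <+: rfs'
        · rw [if_pos hp, if_pos (List.cons_prefix_cons.mpr ⟨rfl, hp⟩)]
          congr 1; omega
        · rw [if_neg hp, if_neg (fun h => hp (List.cons_prefix_cons.mp h).2)]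
      · rw [if_pos (Or.inr (by simp; exact fun h => hcd h.symm)),
            if_neg (fun h => hcd (List.cons_prefix_cons.mp h).1)]

theorem suffix_iff_reverse_prefix (ss fs : List Char) :
    ss.reverse <+: fs.reverse ↔ ss <:+ fs := by
  constructor
  · intro h; simpa using (List.reverse_prefix.mp (by simpa using h))
  · intro h; exact List.reverse_prefix.mpr (by simpa using h)

-- ===== VERDICT (by name: the statement is the Claim_ definition above) =====
theorem find_index_of_overlap_spec : Claim_equal_find_index_of_overlap := by
  intro fst_string snd_string _
  unfold Spec_find_index_of_overlap find_index_of_overlap find_index_of_overlap_alt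
  by_cases hemp : snd_string = ""
  · subst hemp; simp
  · have hne : snd_string.toList ≠ [] := by
      intro h
      exact hemp (by
        have := congrArg String.ofList h
        simpa using this)
    rw [if_neg (by
      simp only [not_lt]
      have : snd_string.toList.length ≠ 0 := by simpa using hne
      omega)]
    have key := findLoopA_reverse snd_string.toList.reverse fst_string.toList.reverse [] []
    simp only [List.reverse_reverse, List.append_nil, List.length_reverse] at key
    rw [key, if_neg hemp]
    have hiff : snd_string.toList.reverse <+: fst_string.toList.reverse
        ↔ PySem.Str.endswith fst_string snd_string = true := by
      rw [suffix_iff_reverse_prefix]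
      simp [PySem.Chars.endswith_iff]
    by_cases hs : PySem.Str.endswith fst_string snd_string
    · rw [if_pos (hiff.mpr hs), if_pos hs]
    · rw [if_neg (fun h => hs (hiff.mp h)), if_neg hs]
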